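-- pv_equiv track=rewrite | github.com/Mohammad-R-N/problems | python/2.medium/ginortS/A.py | func
-- ===== SOURCE A (Python) =====
-- s = list("Sorting1234 ".strip())
--
-- def func(s):
--     upper_words = []
--     lower_words = []
--     digits = []
--     for i in s:
--         if i.isupper():
--             upper_words.append(i)
--         elif i.islower():
--             lower_words.append(i)
--         elif i.isdigit():
--             digits.append(i)
--     upper_words.sort()
--     lower_words.sort()
--     digits.sort()
--     odd_sorted = []
--     even_sorted = []
--     for j in digits:
--         if int(j) % 2 != 0:
--             odd_sorted.append(j)
--         else:
--             even_sorted.append(j)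
--     upper_words = "".join(upper_words)
--     lower_words = "".join(lower_words)
--     odd_sorted = "".join(odd_sorted)
--     even_sorted = "".join(even_sorted)
--
--     return f"{lower_words}{upper_words}{odd_sorted}{even_sorted}"
-- ===== SOURCE B (Python) =====
-- def func(s):
--     order = "abcdefghijklmnopqrstuvwxyzABCDEFGHIJKLMNOPQRSTUVWXYZ1357902468"
--     present = set(s)
--     return "".join(ch * s.count(ch) for ch in order if ch in present)
-- ===== Notes on version B (the rewrite author's own statement) =====
-- stated objective: faster
-- what changed: Replaced the partition-then-comparison-sort pipeline by counting: build the set of characters present, then for each character of the fixed output alphabet (lowercase, uppercase, odd digits, even digits) emit it repeated s.count(ch) times.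
import Mathlib
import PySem

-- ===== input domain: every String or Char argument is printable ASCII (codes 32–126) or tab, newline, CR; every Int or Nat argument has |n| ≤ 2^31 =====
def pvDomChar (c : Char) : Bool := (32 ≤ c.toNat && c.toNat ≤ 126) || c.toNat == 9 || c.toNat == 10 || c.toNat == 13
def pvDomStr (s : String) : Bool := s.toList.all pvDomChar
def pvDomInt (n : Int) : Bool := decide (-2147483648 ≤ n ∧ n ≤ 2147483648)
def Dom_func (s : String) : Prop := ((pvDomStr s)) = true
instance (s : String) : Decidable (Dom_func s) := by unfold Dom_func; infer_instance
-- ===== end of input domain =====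

-- B replaces A's partition + comparison sorts by a one-pass character count emitted along the fixed output alphabet (faster: counting sort).


-- ===== PORT A =====
-- the classification loop's body
def stepA (acc : List Char × List Char × List Char) (i : Char) : List Char × List Char × List Char :=
  if PySem.Chars.isupper i then (acc.1 ++ [i], acc.2.1, acc.2.2)
  else if PySem.Chars.islower i then (acc.1, acc.2.1 ++ [i], acc.2.2)
  else if PySem.Chars.isdigit i then (acc.1, acc.2.1, acc.2.2 ++ [i])
  else acc

-- int(j); in A j is always a single digit, so ofStr? never returns none and the default is unreachable
def intChar (j : Char) : Int := (PySem.Int.ofStr? (String.mk [j])).getD 0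

-- the odd/even split loop's body
def stepOE (acc : List Char × List Char) (j : Char) : List Char × List Char :=
  if PySem.Int.mod (intChar j) 2 != 0 then (acc.1 ++ [j], acc.2) else (acc.1, acc.2 ++ [j])

def func (s : String) : String :=
  let st := s.toList.foldl stepA ([], [], [])
  let upper_words := PySem.List.sorted st.1 (fun x => x) false
  let lower_words := PySem.List.sorted st.2.1 (fun x => x) false
  let digits := PySem.List.sorted st.2.2 (fun x => x) false
  let oe := digits.foldl stepOE ([], [])
  String.mk (lower_words ++ upper_words ++ oe.1 ++ oe.2)

-- ===== PORT B =====
def func_alt (s : String) : String :=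
  let order := "abcdefghijklmnopqrstuvwxyzABCDEFGHIJKLMNOPQRSTUVWXYZ1357902468".toList
  let present := PySem.Set.ofList s.toList
  String.mk (order.flatMap (fun ch =>
    if ch ∈ present then PySem.List.pyRepeat [ch] ((PySem.Str.count s (String.mk [ch]) : Int)) else []))

-- ===== PRECONDITION & SPEC =====
def Spec_func (s : String) (out : String) : Prop := out = func_alt s
instance (s : String) (out : String) : Decidable (Spec_func s out) := by unfold Spec_func; infer_instance

-- ===== CLAIM (what is proved, stated in full; the proofs are below) =====
def Claim_equal_func : Prop := ∀ (s : String), Dom_func s → Spec_func s (func s)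

-- ===== LEMMAS AND PROOFS =====

def lowerL : List Char := "abcdefghijklmnopqrstuvwxyz".toList
def upperL : List Char := "ABCDEFGHIJKLMNOPQRSTUVWXYZ".toList
def oddL : List Char := "13579".toList
def evenL : List Char := "02468".toList
def digitL : List Char := "0123456789".toList

def oddp (j : Char) : Bool := PySem.Int.mod (intChar j) 2 != 0

-- the fixed alphabets are strictly increasing and class-homogeneous
lemma lower_pw : lowerL.Pairwise (· < ·) := List.IsChain.pairwise (by decide)
lemma upper_pw : upperL.Pairwise (· < ·) := List.IsChain.pairwise (by decide)
lemma odd_pw : oddL.Pairwise (· < ·) := List.IsChain.pairwise (by decide)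
lemma even_pw : evenL.Pairwise (· < ·) := List.IsChain.pairwise (by decide)
lemma lower_nd : lowerL.Nodup := lower_pw.imp ne_of_lt
lemma upper_nd : upperL.Nodup := upper_pw.imp ne_of_lt
lemma odd_nd : oddL.Nodup := odd_pw.imp ne_of_lt
lemma even_nd : evenL.Nodup := even_pw.imp ne_of_lt

lemma lower_p : ∀ c ∈ lowerL, PySem.Chars.islower c = true := by
  have h : lowerL.all (fun c => PySem.Chars.islower c) = true := by rfl
  exact fun c hc => List.all_eq_true.mp h c hc

lemma upper_p : ∀ c ∈ upperL, PySem.Chars.isupper c = true := by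
  have h : upperL.all (fun c => PySem.Chars.isupper c) = true := by rfl
  exact fun c hc => List.all_eq_true.mp h c hc

lemma odd_pq : ∀ c ∈ oddL, PySem.Chars.isdigit c = true ∧ oddp c = true := by
  have h1 : oddL.all (fun c => PySem.Chars.isdigit c) = true := by rfl
  have h2 : oddL.all oddp = true := by rfl
  exact fun c hc => ⟨List.all_eq_true.mp h1 c hc, List.all_eq_true.mp h2 c hc⟩

lemma even_pq : ∀ c ∈ evenL, PySem.Chars.isdigit c = true ∧ (!oddp c) = true := by
  have h1 : evenL.all (fun c => PySem.Chars.isdigit c) = true := by rfl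
  have h2 : evenL.all (fun c => !oddp c) = true := by rfl
  exact fun c hc => ⟨List.all_eq_true.mp h1 c hc, List.all_eq_true.mp h2 c hc⟩

-- characterisation of A's classification loop
lemma foldl3 (cs u l d : List Char) :
    cs.foldl stepA (u, l, d) =
      (u ++ cs.filter (fun c => PySem.Chars.isupper c),
       l ++ cs.filter (fun c => !PySem.Chars.isupper c && PySem.Chars.islower c),
       d ++ cs.filter (fun c => !PySem.Chars.isupper c && !PySem.Chars.islower c && PySem.Chars.isdigit c)) := by
  induction cs generalizing u l d with
  | nil => simp
  | cons a t ih =>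
    simp only [List.foldl_cons, stepA, List.filter_cons]
    by_cases h1 : PySem.Chars.isupper a = true
    · rw [if_pos h1, ih]
      simp [h1]
    · rw [if_neg h1]
      rw [Bool.not_eq_true] at h1
      by_cases h2 : PySem.Chars.islower a = true
      · rw [if_pos h2, ih]
        simp [h1, h2]
      · rw [if_neg h2]
        rw [Bool.not_eq_true] at h2
        by_cases h3 : PySem.Chars.isdigit a = true
        · rw [if_pos h3, ih]
          simp [h1, h2, h3]
        · rw [if_neg h3]
          rw [Bool.not_eq_true] at h3
          rw [ih]
          simp [h1, h2, h3]

-- characterisation of A's odd/even loop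
lemma foldl2 (ds o e : List Char) :
    ds.foldl stepOE (o, e) = (o ++ ds.filter oddp, e ++ ds.filter (fun j => !oddp j)) := by
  induction ds generalizing o e with
  | nil => simp
  | cons a t ih =>
    simp only [List.foldl_cons, stepOE, List.filter_cons]
    by_cases h : oddp a = true
    · rw [if_pos (show (PySem.Int.mod (intChar a) 2 != 0) = true from h), ih]
      simp only [h, if_pos, Bool.not_true, if_true]
      simp
    · rw [if_neg (show ¬ ((PySem.Int.mod (intChar a) 2 != 0) = true) from h), ih]
      rw [Bool.not_eq_true] at h
      simp only [h, Bool.not_false, if_false, if_true]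
      simp

-- ASCII ranges are disjoint
lemma low_not_up (c : Char) (h : PySem.Chars.islower c = true) : PySem.Chars.isupper c = false := by
  simp [PySem.Chars.islower, Char.le_def, UInt32.le_iff_toNat_le] at h
  simp [PySem.Chars.isupper, Char.le_def, UInt32.le_iff_toNat_le]
  omega

lemma digit_not_up (c : Char) (h : PySem.Chars.isdigit c = true) : PySem.Chars.isupper c = false := by
  simp [PySem.Chars.isdigit, Char.le_def, UInt32.le_iff_toNat_le] at h
  simp [PySem.Chars.isupper, Char.le_def, UInt32.le_iff_toNat_le]
  omega

lemma digit_not_low (c : Char) (h : PySem.Chars.isdigit c = true) : PySem.Chars.islower c = false := by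
  simp [PySem.Chars.isdigit, Char.le_def, UInt32.le_iff_toNat_le] at h
  simp [PySem.Chars.islower, Char.le_def, UInt32.le_iff_toNat_le]
  omega

lemma pL_eq (c : Char) : (!PySem.Chars.isupper c && PySem.Chars.islower c) = PySem.Chars.islower c := by
  cases h : PySem.Chars.islower c
  · simp
  · simp [low_not_up c h]

lemma pD_eq (c : Char) :
    (!PySem.Chars.isupper c && !PySem.Chars.islower c && PySem.Chars.isdigit c) = PySem.Chars.isdigit c := by
  cases h : PySem.Chars.isdigit c
  · simp
  · simp [digit_not_up c h, digit_not_low c h]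

-- membership in the fixed alphabets
lemma mem_lower (c : Char) (h : PySem.Chars.islower c = true) : c ∈ lowerL := by
  simp [PySem.Chars.islower, Char.le_def, UInt32.le_iff_toNat_le] at h
  have hall : ∀ n, n < 128 → 97 ≤ n → n ≤ 122 → Char.ofNat n ∈ lowerL := by decide
  have := hall c.toNat (by omega) (by omega) (by omega)
  rwa [Char.ofNat_toNat] at this

lemma mem_upper (c : Char) (h : PySem.Chars.isupper c = true) : c ∈ upperL := by
  simp [PySem.Chars.isupper, Char.le_def, UInt32.le_iff_toNat_le] at h
  have hall : ∀ n, n < 128 → 65 ≤ n → n ≤ 90 → Char.ofNat n ∈ upperL := by decide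
  have := hall c.toNat (by omega) (by omega) (by omega)
  rwa [Char.ofNat_toNat] at this

lemma mem_digit (c : Char) (h : PySem.Chars.isdigit c = true) : c ∈ digitL := by
  simp [PySem.Chars.isdigit, Char.le_def, UInt32.le_iff_toNat_le] at h
  have hall : ∀ n, n < 128 → 48 ≤ n → n ≤ 57 → Char.ofNat n ∈ digitL := by decide
  have := hall c.toNat (by omega) (by omega) (by omega)
  rwa [Char.ofNat_toNat] at this

lemma mem_odd (c : Char) (hd : PySem.Chars.isdigit c = true) (ho : oddp c = true) : c ∈ oddL := by
  have := mem_digit c hd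
  simp [digitL] at this
  rcases this with h|h|h|h|h|h|h|h|h|h <;> subst h <;> revert ho <;> decide

lemma mem_even (c : Char) (hd : PySem.Chars.isdigit c = true) (ho : oddp c = false) : c ∈ evenL := by
  have := mem_digit c hd
  simp [digitL] at this
  rcases this with h|h|h|h|h|h|h|h|h|h <;> subst h <;> revert ho <;> decide

-- counting-sort blocks: counts and order
lemma count_blocks (alpha : List Char) (f : Char → Nat) (hnd : alpha.Nodup) (v : Char) :
    (alpha.flatMap (fun c => List.replicate (f c) c)).count v = if v ∈ alpha then f v else 0 := by
  induction alpha with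
  | nil => simp
  | cons a t ih =>
    rw [List.flatMap_cons, List.count_append, ih hnd.of_cons]
    have hat : a ∉ t := (List.nodup_cons.mp hnd).1
    by_cases hv : v = a
    · subst hv
      simp [List.count_replicate, hat]
    · simp [List.count_replicate, hv, List.mem_cons]
      exact fun h => absurd h.symm hv

lemma blocks_perm (alpha l : List Char) (hnd : alpha.Nodup) (hsub : ∀ x ∈ l, x ∈ alpha) :
    (alpha.flatMap (fun c => List.replicate (l.count c) c)).Perm l := by
  rw [List.perm_iff_count]
  intro v
  rw [count_blocks _ _ hnd]
  by_cases hv : v ∈ alpha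
  · simp [hv]
  · simp only [hv, if_false]
    exact (List.count_eq_zero.mpr (fun h => hv (hsub v h))).symm

lemma blocks_pairwise (alpha : List Char) (f : Char → Nat) (h : alpha.Pairwise (· < ·)) :
    (alpha.flatMap (fun c => List.replicate (f c) c)).Pairwise (· ≤ ·) := by
  induction alpha with
  | nil => simp
  | cons a t ih =>
    rw [List.flatMap_cons, List.pairwise_append]
    refine ⟨List.pairwise_replicate.mpr (Or.inr le_rfl), ih h.of_cons, ?_⟩
    intro x hx y hy
    rcases List.mem_flatMap.mp hy with ⟨c, hc, hyc⟩
    rw [List.eq_of_mem_replicate hx, List.eq_of_mem_replicate hyc]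
    exact le_of_lt ((List.pairwise_cons.mp h).1 c hc)

-- the four segments of A as counting-sort blocks over cs
lemma seg_sorted (alpha : List Char) (p : Char → Bool) (cs : List Char)
    (hnd : alpha.Nodup) (hpw : alpha.Pairwise (· < ·))
    (hmem : ∀ x, p x = true → x ∈ alpha) (hp : ∀ c ∈ alpha, p c = true) :
    PySem.List.sorted (cs.filter p) (fun x => x) false
      = alpha.flatMap (fun c => List.replicate (cs.count c) c) := by
  have hcnt : ∀ c ∈ alpha, (cs.filter p).count c = cs.count c := by
    intro c hc
    exact List.count_filter (hp c hc)
  have hmap : alpha.flatMap (fun c => List.replicate (cs.count c) c)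
      = alpha.flatMap (fun c => List.replicate ((cs.filter p).count c) c) := by
    apply List.flatMap_congr
    intro c hc
    rw [hcnt c hc]
  rw [hmap]
  exact PySem.List.sorted_id_eq_of_perm_of_pairwise _ _
    (blocks_perm alpha _ hnd (fun x hx => hmem x (List.of_mem_filter hx)))
    (blocks_pairwise alpha _ hpw)

-- a filter of a Python-sorted list is the corresponding counting-sort blocks
lemma seg_filter_sorted (alpha : List Char) (p q : Char → Bool) (cs : List Char)
    (hnd : alpha.Nodup) (hpw : alpha.Pairwise (· < ·))
    (hmem : ∀ x, p x = true → q x = true → x ∈ alpha)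
    (hpq : ∀ c ∈ alpha, p c = true ∧ q c = true) :
    (PySem.List.sorted (cs.filter p) (fun x => x) false).filter q
      = alpha.flatMap (fun c => List.replicate (cs.count c) c) := by
  have hperm : (alpha.flatMap (fun c => List.replicate (cs.count c) c)).Perm
      ((PySem.List.sorted (cs.filter p) (fun x => x) false).filter q) := by
    have h1 : ((PySem.List.sorted (cs.filter p) (fun x => x) false).filter q).Perm
        ((cs.filter p).filter q) := (PySem.List.sorted_perm _ _ _).filter q
    have hcnt : ∀ c ∈ alpha, ((cs.filter p).filter q).count c = cs.count c := by
      intro c hc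
      rw [List.count_filter (hpq c hc).2, List.count_filter (hpq c hc).1]
    have hmap : alpha.flatMap (fun c => List.replicate (cs.count c) c)
        = alpha.flatMap (fun c => List.replicate (((cs.filter p).filter q).count c) c) := by
      apply List.flatMap_congr
      intro c hc
      rw [hcnt c hc]
    rw [hmap]
    exact (blocks_perm alpha _ hnd (fun x hx => hmem x
      (List.of_mem_filter (List.mem_of_mem_filter hx)) (List.of_mem_filter hx))).trans h1.symm
  have hs1 : (alpha.flatMap (fun c => List.replicate (cs.count c) c)).Pairwise (· ≤ ·) :=
    blocks_pairwise alpha _ hpw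
  have hs2 : ((PySem.List.sorted (cs.filter p) (fun x => x) false).filter q).Pairwise (· ≤ ·) := by
    have := PySem.List.sorted_pairwise (xs := cs.filter p) (key := fun x => x)
    exact this.filter q
  exact List.Perm.eq_of_pairwise (fun a b _ _ hab hba => le_antisymm hab hba) hs2 hs1 hperm.symm

-- s.count of a one-character string is the character count
lemma count_go_single (c : Char) (fuel : Nat) (l : List Char) (acc : Nat)
    (h : l.length ≤ fuel) : PySem.Chars.count.go [c] fuel l acc = acc + l.count c := by
  induction fuel generalizing l acc with
  | zero =>
    have hl : l = [] := List.eq_nil_of_length_eq_zero (Nat.le_zero.mp h)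
    subst hl
    simp [PySem.Chars.count.go]
  | succ n ih =>
    cases l with
    | nil => simp [PySem.Chars.count.go]
    | cons hd t =>
      rw [PySem.Chars.count.go]
      by_cases hc : c = hd
      · subst hc
        simp only [List.isPrefixOf, BEq.rfl, Bool.true_and, List.isPrefixOf_nil_left,
          if_true, List.length_singleton, List.drop_one, List.tail_cons]
        rw [ih t (acc + 1) (by simpa using h)]
        simp
        omega
      · have hp : ([c].isPrefixOf (hd :: t)) = false := by
          show ((c == hd) && ([] : List Char).isPrefixOf t) = false
          simp [hc]
        rw [hp]
        simp only [Bool.false_eq_true, if_false]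
        rw [ih t acc (by simpa using h)]
        simp [List.count_cons, Ne.symm hc]

lemma chars_count_single (s : List Char) (c : Char) : PySem.Chars.count s [c] = s.count c := by
  simp [PySem.Chars.count, count_go_single c s.length s 0 le_rfl]

-- B's list is the counting-sort blocks over the whole order alphabet
lemma alt_eq (s : String) :
    func_alt s = String.mk ((lowerL ++ upperL ++ oddL ++ evenL).flatMap
      (fun c => List.replicate (s.toList.count c) c)) := by
  have horder : ("abcdefghijklmnopqrstuvwxyzABCDEFGHIJKLMNOPQRSTUVWXYZ1357902468").toList
      = lowerL ++ upperL ++ oddL ++ evenL := by decide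
  show String.mk ((("abcdefghijklmnopqrstuvwxyzABCDEFGHIJKLMNOPQRSTUVWXYZ1357902468" : String).toList).flatMap
      (fun ch => if ch ∈ PySem.Set.ofList s.toList
        then PySem.List.pyRepeat [ch] ((PySem.Str.count s (String.mk [ch]) : Int)) else [])) = _
  rw [horder]
  refine congrArg String.mk (List.flatMap_congr ?_)
  intro c _
  by_cases hm : c ∈ PySem.Set.ofList s.toList
  · rw [if_pos hm, PySem.List.pyRepeat_singleton]
    have hcount : PySem.Str.count s (String.mk [c]) = s.toList.count c := by
      have hmk : (String.mk [c]).toList = [c] := Eq.symm (String.ofList_eq.mp rfl)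
      simp only [PySem.Str.count, hmk]
      exact chars_count_single s.toList c
    rw [hcount]
    simp
  · rw [if_neg hm]
    have hz : s.toList.count c = 0 :=
      List.count_eq_zero.mpr (fun h => hm ((PySem.Set.mem_ofList s.toList c).mpr h))
    rw [hz]
    simp

-- ===== VERDICT (by name: the statement is the Claim_ definition above) =====
set_option maxRecDepth 4096 in
theorem func_spec : Claim_equal_func := by
  intro s _
  unfold Spec_func func
  rw [alt_eq, foldl3]
  simp only [List.nil_append]
  rw [List.filter_congr (fun x _ => pL_eq x), List.filter_congr (fun x _ => pD_eq x)]
  rw [foldl2]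
  simp only [List.nil_append]
  rw [seg_sorted lowerL _ s.toList lower_nd lower_pw (fun x h => mem_lower x h) lower_p]
  rw [seg_sorted upperL _ s.toList upper_nd upper_pw (fun x h => mem_upper x h) upper_p]
  rw [seg_filter_sorted oddL _ _ s.toList odd_nd odd_pw
    (fun x h1 h2 => mem_odd x h1 h2) odd_pq]
  rw [seg_filter_sorted evenL _ (fun j => !oddp j) s.toList even_nd even_pw
    (fun x h1 h2 => mem_even x h1 (by simpa using h2)) even_pq]
  simp [List.flatMap_append]
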